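-- pv_equiv track=rewrite | github.com/python/mypy | mypy/lex.py | calc_indent
-- ===== SOURCE A (Python) =====
-- def calc_indent(s: str) -> int:
--     indent = 0
--     for ch in s:
--         if ch == ' ':
--             indent += 1
--         else:
--             # Tab: 8 spaces (rounded to a multiple of 8).
--             indent += 8 - indent % 8
--     return indent
-- ===== SOURCE B (Python) =====
-- def calc_indent(s: str) -> int:
--     # Run-based: process maximal runs of spaces / non-spaces instead of single chars.
--     indent = 0
--     i = 0
--     n = len(s)
--     while i < n:
--         j = i
--         if s[i] == ' ':
--             while j < n and s[j] == ' ':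
--                 j += 1
--             indent += j - i
--         else:
--             while j < n and s[j] != ' ':
--                 j += 1
--             # first non-space rounds up to a multiple of 8, each further one adds 8
--             indent += 8 - indent % 8 + 8 * (j - i - 1)
--         i = j
--     return indent
-- ===== Notes on version B (the rewrite author's own statement) =====
-- stated objective: alternative
-- what changed: B scans the string in maximal runs of spaces / non-spaces and updates the indent once per run (a whole space run adds its length; a non-space run rounds up to a multiple of 8 once and adds 8 per further char), instead of A's per-character loop with a modulo per non-space char.
import Mathlib
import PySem

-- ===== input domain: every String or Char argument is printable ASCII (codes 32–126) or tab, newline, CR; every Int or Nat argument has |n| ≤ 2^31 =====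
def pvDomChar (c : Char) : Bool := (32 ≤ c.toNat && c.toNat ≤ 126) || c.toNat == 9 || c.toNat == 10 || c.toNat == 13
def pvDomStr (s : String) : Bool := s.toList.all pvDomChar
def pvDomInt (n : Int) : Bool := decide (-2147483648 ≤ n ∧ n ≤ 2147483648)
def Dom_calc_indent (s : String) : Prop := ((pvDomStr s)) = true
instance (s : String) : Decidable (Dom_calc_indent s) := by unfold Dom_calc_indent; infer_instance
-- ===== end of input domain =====

-- B replaces A's per-character loop by a scan over maximal runs of spaces / non-spaces,
-- updating the indent once per run (objective: alternative decomposition).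

-- ===== PORT A =====
-- per-character fold, exactly A's loop body
def calc_indent (s : String) : Int :=
  s.toList.foldl
    (fun indent ch => if ch = ' ' then indent + 1 else indent + (8 - PySem.Int.mod indent 8))
    0

-- ===== PORT B =====
-- run loop: takeWhile/dropWhile play the role of Source B's inner while loops over j
def calcRunsB (indent : Int) : List Char → Int
  | [] => indent
  | c :: rest =>
    if c = ' ' then
      calcRunsB (indent + (1 + ((rest.takeWhile (fun x => x = ' ')).length : Int)))
        (rest.dropWhile (fun x => x = ' '))
    else
      calcRunsB (indent + (8 - PySem.Int.mod indent 8) + 8 * ((rest.takeWhile (fun x => x ≠ ' ')).length : Int))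
        (rest.dropWhile (fun x => x ≠ ' '))
  termination_by l => l.length
  decreasing_by
  · exact Nat.lt_succ_of_le (List.length_dropWhile_le _ _)
  · exact Nat.lt_succ_of_le (List.length_dropWhile_le _ _)

def calc_indent_alt (s : String) : Int := calcRunsB 0 s.toList

-- ===== PRECONDITION & SPEC =====
def Spec_calc_indent (s : String) (out : Int) : Prop := out = calc_indent_alt s
instance (s : String) (out : Int) : Decidable (Spec_calc_indent s out) := by unfold Spec_calc_indent; infer_instance

-- ===== CLAIM (what is proved, stated in full; the proofs are below) =====
def Claim_equal_calc_indent : Prop := ∀ (s : String), Dom_calc_indent s → Spec_calc_indent s (calc_indent s)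

-- ===== LEMMAS AND PROOFS =====

def pvStep (indent : Int) (ch : Char) : Int :=
  if ch = ' ' then indent + 1 else indent + (8 - PySem.Int.mod indent 8)

theorem pvMod8 (a : Int) : PySem.Int.mod a 8 = a % 8 :=
  PySem.Int.mod_eq_emod_of_pos (by norm_num)

theorem pvFoldSpaces (l : List Char) (h : ∀ c ∈ l, c = ' ') (indent : Int) :
    l.foldl pvStep indent = indent + (l.length : Int) := by
  induction l generalizing indent with
  | nil => simp
  | cons c t ih =>
    have hc : c = ' ' := h c (by simp)
    simp only [List.foldl_cons, pvStep, if_pos hc, List.length_cons]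
    rw [ih (fun x hx => h x (by simp [hx]))]
    push_cast; ring

theorem pvFoldNonspaces (l : List Char) (h : ∀ c ∈ l, c ≠ ' ') (indent : Int)
    (h0 : indent % 8 = 0) :
    l.foldl pvStep indent = indent + 8 * (l.length : Int) := by
  induction l generalizing indent with
  | nil => simp
  | cons c t ih =>
    have hc : c ≠ ' ' := h c (by simp)
    simp only [List.foldl_cons, pvStep, if_neg hc, pvMod8, List.length_cons]
    rw [h0, ih (fun x hx => h x (by simp [hx])) (indent + (8 - 0)) (by omega)]
    push_cast; ring

theorem pvRunsEqFold : ∀ (n : Nat) (l : List Char), l.length ≤ n → ∀ indent : Int,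
    calcRunsB indent l = l.foldl pvStep indent := by
  intro n
  induction n with
  | zero =>
    intro l hl indent
    have : l = [] := List.eq_nil_of_length_eq_zero (Nat.le_zero.mp hl)
    subst this; simp [calcRunsB]
  | succ n ih =>
    intro l hl indent
    cases l with
    | nil => simp [calcRunsB]
    | cons c rest =>
      by_cases hc : c = ' '
      · rw [calcRunsB, if_pos hc]
        rw [ih _ (le_trans (List.length_dropWhile_le _ _) (Nat.le_of_succ_le_succ hl))]
        conv_rhs => rw [← List.takeWhile_append_dropWhile (p := fun x => x = ' ') (l := rest)]
        rw [List.foldl_cons, List.foldl_append]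
        congr 1
        have := pvFoldSpaces (rest.takeWhile (fun x => x = ' '))
          (fun x hx => by simpa using List.mem_takeWhile_imp hx)
          (pvStep indent c)
        rw [this]
        simp only [pvStep, if_pos hc]
        ring
      · rw [calcRunsB, if_neg hc]
        rw [ih _ (le_trans (List.length_dropWhile_le _ _) (Nat.le_of_succ_le_succ hl))]
        conv_rhs => rw [← List.takeWhile_append_dropWhile (p := fun x => x ≠ ' ') (l := rest)]
        rw [List.foldl_cons, List.foldl_append]
        congr 1
        have h0 : (indent + (8 - PySem.Int.mod indent 8)) % 8 = 0 := by
          rw [pvMod8]; omega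
        have := pvFoldNonspaces (rest.takeWhile (fun x => x ≠ ' '))
          (fun x hx => by simpa using List.mem_takeWhile_imp hx)
          (pvStep indent c) (by simpa [pvStep, if_neg hc] using h0)
        rw [this]
        simp only [pvStep, if_neg hc]

-- ===== VERDICT (by name: the statement is the Claim_ definition above) =====
theorem calc_indent_spec : Claim_equal_calc_indent := by
  intro s _
  unfold Spec_calc_indent calc_indent calc_indent_alt
  exact (pvRunsEqFold s.toList.length s.toList le_rfl 0).symm
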